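-- pv_equiv track=rewrite | github.com/zwingthomas/Advent-Of-Code | 2023/day14/boulders.py | tilt_platform_down
-- ===== SOURCE A (Python) =====
-- def tilt_platform_down(platform):
--     for c in range(len(platform[0])):
--         for r in reversed(range(len(platform))):
--             if platform[r][c] == 'O':
--                 r += 1
--                 while platform[r][c] == '.':
--                     platform[r][c] = 'O'
--                     platform[r - 1][c] = '.'
--                     r += 1
--     return platform
-- ===== SOURCE B (Python) =====
-- def tilt_platform_down(platform):
--     rows = len(platform)
--     for c in range(len(platform[0])):
--         free = rows - 1
--         for r in range(rows - 1, -1, -1):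
--             cell = platform[r][c]
--             if cell == 'O':
--                 platform[r][c] = '.'
--                 platform[free][c] = 'O'
--                 free -= 1
--             elif cell != '.':
--                 free = r - 1
--     return platform
-- ===== Notes on version B (the rewrite author's own statement) =====
-- stated objective: alternative
-- what changed: Replaces A's inner while-loop that bubbles each boulder down one cell at a time with a single bottom-up pass per column that tracks the next free row and moves each boulder there in one write.
-- outside the precondition, e.g. on tilt_platform_down([['O'], ['.']]): A raises IndexError, B returns [['.'], ['O']]; on tilt_platform_down([]): A raises IndexError, B raises IndexError
import Mathlib
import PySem

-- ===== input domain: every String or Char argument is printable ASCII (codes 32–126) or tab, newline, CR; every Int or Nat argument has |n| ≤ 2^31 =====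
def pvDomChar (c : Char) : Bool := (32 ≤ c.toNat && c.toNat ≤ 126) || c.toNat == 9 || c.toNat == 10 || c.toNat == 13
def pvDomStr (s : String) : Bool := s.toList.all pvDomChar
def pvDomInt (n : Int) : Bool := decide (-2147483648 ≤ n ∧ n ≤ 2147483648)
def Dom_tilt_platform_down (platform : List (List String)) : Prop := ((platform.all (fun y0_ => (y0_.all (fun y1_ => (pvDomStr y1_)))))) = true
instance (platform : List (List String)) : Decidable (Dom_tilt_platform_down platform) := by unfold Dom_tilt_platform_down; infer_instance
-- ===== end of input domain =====

-- B replaces A's cell-by-cell bubbling inner while-loop by a single bottom-up pass per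
-- column that tracks the next free row. Both Pythons mutate the argument in place and end
-- in the same final state; the ports model the returned value.

-- ===== PORT A =====
-- platform[r][c]; "" when out of range (Python raises there; such runs are excluded by Pre_).
def pvGet : List (List String) → Nat → Nat → String
  | [], _, _ => ""
  | row :: _, 0, c => row.getD c ""
  | _ :: rest, r+1, c => pvGet rest r c

-- platform[r][c] = v (no-op out of range; Python never writes out of range here).
def pvSet : List (List String) → Nat → Nat → String → List (List String)
  | [], _, _, _ => []
  | row :: rest, 0, c, v => row.set c v :: rest
  | row :: rest, r+1, c, v => row :: pvSet rest r c v

-- the inner "while platform[r][c] == '.'" loop of A; fuel = number of rows bounds it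
-- (the loop stops at the lower grid edge, where Python A raises instead; excluded by Pre_).
def pvWhileA (c : Nat) : Nat → Nat → List (List String) → List (List String)
  | 0, _, p => p
  | fuel+1, r, p =>
    if pvGet p r c = "." then
      pvWhileA c fuel (r+1) (pvSet (pvSet p r c "O") (r-1) c ".")
    else p

-- the inner "for r in reversed(range(len(platform)))" loop of A for one column c
def pvInnerA (rows c : Nat) (p : List (List String)) : List (List String) :=
  ((List.range rows).reverse).foldl
    (fun p r => if pvGet p r c = "O" then pvWhileA c rows (r+1) p else p) p

def tilt_platform_down (platform : List (List String)) : List (List String) :=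
  (List.range ((platform.headD []).length)).foldl
    (fun p c => pvInnerA platform.length c p) platform

-- ===== PORT B =====
-- one step of B's single bottom-up pass: state is (free, platform); `free` is an Int as in
-- the Python; it is only ever used as an index when it is ≥ 0 (proved in pvInnerEq below).
def pvStepB (c : Nat) (st : Int × List (List String)) (r : Nat) : Int × List (List String) :=
  let cell := pvGet st.2 r c
  if cell = "O" then (st.1 - 1, pvSet (pvSet st.2 r c ".") st.1.toNat c "O")
  else if cell ≠ "." then ((r : Int) - 1, st.2)
  else st

-- B's pass over one column c (rows-1 down to 0), starting with free = rows - 1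
def pvInnerB (rows c : Nat) (p : List (List String)) : List (List String) :=
  (((List.range rows).reverse).foldl (pvStepB c) ((rows : Int) - 1, p)).2

def tilt_platform_down_alt (platform : List (List String)) : List (List String) :=
  (List.range ((platform.headD []).length)).foldl
    (fun p c => pvInnerB platform.length c p) platform

-- ===== PRECONDITION & SPEC =====
-- Pre_ excludes exactly the inputs on which Python A raises IndexError: the empty grid,
-- a row shorter than row 0, and a boulder 'O' with only '.' below it in its column
-- (A's while-loop pushes it past the last row).
def Pre_tilt_platform_down (platform : List (List String)) : Prop :=
  platform ≠ [] ∧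
  (∀ row ∈ platform, (platform.headD []).length ≤ row.length) ∧
  (∀ c < (platform.headD []).length, ∀ r < platform.length,
    (platform.getD r []).getD c "" = "O" →
      ∃ s < platform.length, r < s ∧ (platform.getD s []).getD c "" ≠ ".")
instance (platform : List (List String)) : Decidable (Pre_tilt_platform_down platform) := by
  unfold Pre_tilt_platform_down; infer_instance

def pvWitness_tilt_platform_down : List (List String) := [["O"], ["."], ["#"]]

def Spec_tilt_platform_down (platform : List (List String)) (out : List (List String)) : Prop := out = tilt_platform_down_alt platform
instance (platform : List (List String)) (out : List (List String)) : Decidable (Spec_tilt_platform_down platform out) := by unfold Spec_tilt_platform_down; infer_instance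

-- ===== CLAIM (what is proved, stated in full; the proofs are below) =====
def Claim_equal_tilt_platform_down : Prop := ∀ (platform : List (List String)), Dom_tilt_platform_down platform → Pre_tilt_platform_down platform → Spec_tilt_platform_down platform (tilt_platform_down platform)

-- ===== LEMMAS AND PROOFS =====

-- row-level set/get facts
theorem pvRowGetSetSelf (row : List String) (c : Nat) (v : String)
    (h : row.getD c "" ≠ "") : (row.set c v).getD c "" = v := by
  induction row generalizing c with
  | nil => simp [List.getD] at h
  | cons a t ih =>
    cases c with
    | zero => simp
    | succ c => simpa using ih c (by simpa using h)

theorem pvRowSetNoop (row : List String) (c : Nat) (v : String)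
    (h : row.getD c "" = v) : row.set c v = row := by
  induction row generalizing c with
  | nil => simp
  | cons a t ih =>
    cases c with
    | zero => simp at h; simp [h]
    | succ c => simpa using ih c (by simpa using h)

-- grid-level set/get facts
theorem pvGet_ge (p : List (List String)) (r c : Nat) (h : p.length ≤ r) :
    pvGet p r c = "" := by
  induction p generalizing r with
  | nil => cases r <;> simp [pvGet]
  | cons row rest ih =>
    cases r with
    | zero => simp at h
    | succ r => exact ih r (by simpa using h)

theorem pvGet_lt (p : List (List String)) (r c : Nat) (h : pvGet p r c ≠ "") :
    r < p.length := by
  by_contra hc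
  exact h (pvGet_ge p r c (by omega))

theorem pvSet_length (p : List (List String)) (r c : Nat) (v : String) :
    (pvSet p r c v).length = p.length := by
  induction p generalizing r with
  | nil => simp [pvSet]
  | cons row rest ih =>
    cases r with
    | zero => simp [pvSet]
    | succ r => simp [pvSet, ih r]

theorem pvGet_pvSet_ne (p : List (List String)) (r r' c c' : Nat) (v : String)
    (h : r' ≠ r) : pvGet (pvSet p r c v) r' c' = pvGet p r' c' := by
  induction p generalizing r r' with
  | nil => simp [pvSet]
  | cons row rest ih =>
    cases r with
    | zero => cases r' with
      | zero => omega
      | succ r' => simp [pvSet, pvGet]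
    | succ r =>
      cases r' with
      | zero => simp [pvSet, pvGet]
      | succ r' => simpa [pvSet, pvGet] using ih r r' (by omega)

theorem pvGet_pvSet_self (p : List (List String)) (r c : Nat) (v : String)
    (h : pvGet p r c ≠ "") : pvGet (pvSet p r c v) r c = v := by
  induction p generalizing r with
  | nil => simp [pvGet] at h
  | cons row rest ih =>
    cases r with
    | zero => simpa [pvSet, pvGet] using pvRowGetSetSelf row c v (by simpa [pvGet] using h)
    | succ r => simpa [pvSet, pvGet] using ih r (by simpa [pvGet] using h)

theorem pvSet_pvSet_same (p : List (List String)) (r c : Nat) (v w : String) :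
    pvSet (pvSet p r c v) r c w = pvSet p r c w := by
  induction p generalizing r with
  | nil => simp [pvSet]
  | cons row rest ih =>
    cases r with
    | zero => simp [pvSet, List.set_set]
    | succ r => simp [pvSet, ih r]

theorem pvSet_comm (p : List (List String)) (r r' c : Nat) (v w : String)
    (h : r ≠ r') : pvSet (pvSet p r c v) r' c w = pvSet (pvSet p r' c w) r c v := by
  induction p generalizing r r' with
  | nil => simp [pvSet]
  | cons row rest ih =>
    cases r with
    | zero => cases r' with
      | zero => omega
      | succ r' => simp [pvSet]
    | succ r =>
      cases r' with
      | zero => simp [pvSet]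
      | succ r' => simp [pvSet, ih r r' (by omega)]

theorem pvSet_noop (p : List (List String)) (r c : Nat) (v : String)
    (h : pvGet p r c = v) : pvSet p r c v = p := by
  induction p generalizing r with
  | nil => simp [pvSet]
  | cons row rest ih =>
    cases r with
    | zero => simp [pvSet, pvRowSetNoop row c v (by simpa [pvGet] using h)]
    | succ r => simp [pvSet, ih r (by simpa [pvGet] using h)]

-- first row s ≥ r of column c whose cell is not "." (p.length at the latest, since
-- pvGet is "" there)
def pvFnd (p : List (List String)) (c : Nat) (r : Nat) : Nat :=
  if h : pvGet p r c = "." then pvFnd p c (r+1) else r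
termination_by p.length - r
decreasing_by
  have : r < p.length := pvGet_lt p r c (by simp [h])
  omega

theorem pvFnd_ge (p : List (List String)) (c r : Nat) : r ≤ pvFnd p c r := by
  fun_induction pvFnd with
  | case1 r h ih => omega
  | case2 r h => omega

theorem pvFnd_get (p : List (List String)) (c r : Nat) :
    pvGet p (pvFnd p c r) c ≠ "." := by
  fun_induction pvFnd with
  | case1 r h ih => exact ih
  | case2 r h => exact h

theorem pvFnd_dots (p : List (List String)) (c r : Nat) :
    ∀ i, r ≤ i → i < pvFnd p c r → pvGet p i c = "." := by
  fun_induction pvFnd with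
  | case1 r h ih =>
    intro i h1 h2
    rcases Nat.eq_or_lt_of_le h1 with h1 | h1
    · exact h1 ▸ h
    · exact ih i h1 h2
  | case2 r h => intro i h1 h2; omega

theorem pvFnd_le (p : List (List String)) (c r : Nat) (h : r ≤ p.length) :
    pvFnd p c r ≤ p.length := by
  fun_induction pvFnd with
  | case1 r h' ih => exact ih (pvGet_lt p r c (by simp [h']))
  | case2 r h' => omega

theorem pvFnd_stop (p : List (List String)) (c r : Nat) (h : pvGet p r c ≠ ".") :
    pvFnd p c r = r := by
  unfold pvFnd; simp [h]

theorem pvFnd_dot (p : List (List String)) (c r : Nat) (h : pvGet p r c = ".") :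
    pvFnd p c r = pvFnd p c (r+1) := by
  conv_lhs => rw [pvFnd]
  simp [h]

theorem pvFnd_eq (p : List (List String)) (c r t : Nat) (h1 : r ≤ t)
    (h2 : ∀ i, r ≤ i → i < t → pvGet p i c = ".") (h3 : pvGet p t c ≠ ".") :
    pvFnd p c r = t := by
  by_cases h : pvGet p r c = "."
  · have hrt : r < t := by
      rcases Nat.eq_or_lt_of_le h1 with h' | h'
      · exact absurd (h' ▸ h) h3
      · exact h'
    rw [pvFnd_dot p c r h]
    exact pvFnd_eq p c (r+1) t hrt (fun i hi hit => h2 i (by omega) hit) h3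
  · rcases Nat.eq_or_lt_of_le h1 with h' | h'
    · exact (pvFnd_stop p c r h).trans h'
    · exact absurd (h2 r (le_refl r) h') h
termination_by t - r

-- the effect of A's while-loop: the boulder at r-1 lands just above the first
-- non-'.' cell below it
theorem pvWhileA_eq (c : Nat) : ∀ (fuel r : Nat) (p : List (List String)), 1 ≤ r →
    pvGet p (r-1) c = "O" → pvFnd p c r - r ≤ fuel →
    pvWhileA c fuel r p = pvSet (pvSet p (r-1) c ".") (pvFnd p c r - 1) c "O" := by
  intro fuel
  induction fuel with
  | zero =>
    intro r p hr hO hf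
    have hge := pvFnd_ge p c r
    have hfr : pvFnd p c r = r := by omega
    rw [hfr]
    have : pvSet (pvSet p (r-1) c ".") (r-1) c "O" = pvSet p (r-1) c "O" :=
      pvSet_pvSet_same p (r-1) c "." "O"
    rw [show r - 1 = r - 1 from rfl, this, pvSet_noop p (r-1) c "O" hO]
    rfl
  | succ fuel ih =>
    intro r p hr hO hf
    by_cases hdot : pvGet p r c = "."
    · -- loop body runs once, then recurse
      have hrne : r ≠ r - 1 := by omega
      set p' := pvSet (pvSet p r c "O") (r-1) c "." with hp'
      have hget' : pvGet p' r c = "O" := by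
        rw [hp', pvGet_pvSet_ne _ _ _ _ _ _ hrne,
          pvGet_pvSet_self p r c "O" (by simp [hdot])]
      have hs : pvFnd p c r = pvFnd p c (r+1) := pvFnd_dot p c r hdot
      have hge1 := pvFnd_ge p c (r+1)
      have hfnd' : pvFnd p' c (r+1) = pvFnd p c (r+1) := by
        apply pvFnd_eq
        · exact hge1
        · intro i hi hit
          rw [hp', pvGet_pvSet_ne _ _ _ _ _ _ (by omega),
            pvGet_pvSet_ne _ _ _ _ _ _ (by omega)]
          exact pvFnd_dots p c (r+1) i hi hit
        · rw [hp', pvGet_pvSet_ne _ _ _ _ _ _ (by omega),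
            pvGet_pvSet_ne _ _ _ _ _ _ (by omega)]
          exact pvFnd_get p c (r+1)
      have hrec := ih (r+1) p' (by omega) (by simpa using hget')
        (by rw [hfnd']; omega)
      have hstep : pvWhileA c (fuel+1) r p = pvWhileA c fuel (r+1) p' := by
        simp [pvWhileA, hdot, hp']
      rw [hstep, hrec, hfnd', ← hs]
      congr 1
      -- pvSet p' r "." = pvSet p (r-1) "."
      show pvSet (pvSet (pvSet p r c "O") (r-1) c ".") ((r+1)-1) c "." = pvSet p (r-1) c "."
      have : ((r:Nat)+1)-1 = r := by omega
      rw [this, pvSet_comm _ (r-1) r c "." "." (by omega), pvSet_pvSet_same,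
        pvSet_noop p r c "." hdot]
    · -- loop never runs
      have hfr : pvFnd p c r = r := pvFnd_stop p c r hdot
      rw [hfr]
      have h1 : pvSet (pvSet p (r-1) c ".") (r-1) c "O" = pvSet p (r-1) c "O" :=
        pvSet_pvSet_same p (r-1) c "." "O"
      rw [h1, pvSet_noop p (r-1) c "O" hO]
      simp [pvWhileA, hdot]

-- length preservation
theorem pvWhileA_length (c : Nat) : ∀ (fuel r : Nat) (p : List (List String)),
    (pvWhileA c fuel r p).length = p.length := by
  intro fuel
  induction fuel with
  | zero => intro r p; rfl
  | succ fuel ih =>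
    intro r p
    by_cases h : pvGet p r c = "."
    · simp [pvWhileA, h, ih, pvSet_length]
    · simp [pvWhileA, h]

theorem pvFoldA_length (rows c : Nat) : ∀ (L : List Nat) (p : List (List String)),
    (L.foldl (fun p r => if pvGet p r c = "O" then pvWhileA c rows (r+1) p else p) p).length
      = p.length := by
  intro L
  induction L with
  | nil => intro p; rfl
  | cons a L ih =>
    intro p
    by_cases h : pvGet p a c = "O" <;> simp [h, ih, pvWhileA_length]

theorem pvInnerA_length (rows c : Nat) (p : List (List String)) :
    (pvInnerA rows c p).length = p.length := pvFoldA_length rows c _ p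

-- the core bisimulation: B's single pass with the free pointer produces, row by row,
-- exactly the grid A's bubbling produces, with free = pvFnd - 1
theorem pvInnerEq (c rows : Nat) : ∀ (k : Nat) (p : List (List String)) (free : Int),
    p.length = rows → k ≤ rows → free = (pvFnd p c k : Int) - 1 →
    (((List.range k).reverse).foldl (pvStepB c) (free, p)).2
      = ((List.range k).reverse).foldl
          (fun p r => if pvGet p r c = "O" then pvWhileA c rows (r+1) p else p) p := by
  intro k
  induction k with
  | zero => intro p free _ _ _; simp
  | succ k ih =>
    intro p free hlen hk hfree
    have hrange : (List.range (k+1)).reverse = k :: (List.range k).reverse := by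
      simp [List.range_succ]
    rw [hrange]
    simp only [List.foldl_cons]
    by_cases hO : pvGet p k c = "O"
    · -- a boulder at row k
      set s := pvFnd p c (k + 1) with hsdef
      have hs1 : k + 1 ≤ s := pvFnd_ge p c (k+1)
      have hs2 : s ≤ rows := hlen ▸ pvFnd_le p c (k+1) (by omega)
      have hwhile : pvWhileA c rows (k+1) p
          = pvSet (pvSet p ((k+1)-1) c ".") (s - 1) c "O" :=
        pvWhileA_eq c rows (k+1) p (by omega) (by simpa using hO) (by omega)
      have hk1 : ((k:Nat)+1)-1 = k := by omega
      rw [hk1] at hwhile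
      have hfreeNat : free.toNat = s - 1 := by omega
      have hstepB : pvStepB c (free, p) k
          = (free - 1, pvSet (pvSet p k c ".") (s-1) c "O") := by
        simp [pvStepB, hO, hfreeNat]
      have hinner : pvGet (pvSet p k c ".") (s-1) c = "." := by
        by_cases hsk : s - 1 = k
        · rw [hsk]; exact pvGet_pvSet_self p k c "." (by simp [hO])
        · rw [pvGet_pvSet_ne _ _ _ _ _ _ hsk]
          exact pvFnd_dots p c (k+1) (s-1) (by omega) (by omega)
      have hstopA : pvGet (pvSet (pvSet p k c ".") (s-1) c "O") (s-1) c = "O" :=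
        pvGet_pvSet_self _ _ _ _ (by simp [hinner])
      have hfndA : pvFnd (pvSet (pvSet p k c ".") (s-1) c "O") c k = s - 1 := by
        apply pvFnd_eq _ _ _ _ (by omega)
        · intro i hik his
          rw [pvGet_pvSet_ne _ _ _ _ _ _ (by omega : i ≠ s - 1)]
          by_cases hieq : i = k
          · rw [hieq]; exact pvGet_pvSet_self p k c "." (by simp [hO])
          · rw [pvGet_pvSet_ne _ _ _ _ _ _ hieq]
            exact pvFnd_dots p c (k+1) i (by omega) (by omega)
        · simp [hstopA]
      rw [hstepB, if_pos hO, hwhile]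
      exact ih (pvSet (pvSet p k c ".") (s-1) c "O") (free - 1)
        (by simp [pvSet_length, hlen]) (by omega)
        (by rw [hfndA]; omega)
    · by_cases hdot : pvGet p k c = "."
      · have hstepB : pvStepB c (free, p) k = (free, p) := by
          simp [pvStepB, hdot]
        have hstepA : (if pvGet p k c = "O" then pvWhileA c rows (k+1) p else p) = p := by
          simp [hO]
        rw [hstepB, hstepA]
        exact ih p free hlen (by omega) (by rw [hfree, pvFnd_dot p c k hdot])
      · have hstepB : pvStepB c (free, p) k = ((k : Int) - 1, p) := by
          simp only [pvStepB]
          rw [if_neg hO, if_pos (by simp [hdot])]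
        have hstepA : (if pvGet p k c = "O" then pvWhileA c rows (k+1) p else p) = p := by
          simp [hO]
        rw [hstepB, hstepA]
        exact ih p _ hlen (by omega) (by rw [pvFnd_stop p c k hdot])

theorem pvInnerAB (rows c : Nat) (p : List (List String)) (hlen : p.length = rows) :
    pvInnerB rows c p = pvInnerA rows c p := by
  unfold pvInnerA pvInnerB
  apply pvInnerEq c rows rows p _ hlen (le_refl rows)
  have : pvGet p rows c = "" := pvGet_ge p rows c (by omega)
  rw [pvFnd_stop p c rows (by simp [this])]

theorem pvOuterEq (rows : Nat) : ∀ (L : List Nat) (p : List (List String)),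
    p.length = rows →
    L.foldl (fun p c => pvInnerA rows c p) p = L.foldl (fun p c => pvInnerB rows c p) p := by
  intro L
  induction L with
  | nil => intro p _; rfl
  | cons a L ih =>
    intro p hlen
    simp only [List.foldl_cons]
    rw [pvInnerAB rows a p hlen]
    exact ih _ (by rw [pvInnerA_length, hlen])

-- ===== VERDICT (by name: the statement is the Claim_ definition above) =====
theorem tilt_platform_down_spec : Claim_equal_tilt_platform_down := by
  intro platform _ _
  unfold Spec_tilt_platform_down tilt_platform_down tilt_platform_down_alt
  exact pvOuterEq platform.length _ platform rfl
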